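-- pv_equiv track=rewrite | github.com/MuhammadShahzeb123/product_matching_system | target_search_scraper.py | _check_product_type_similarity
-- ===== SOURCE A (Python) =====
-- def _check_product_type_similarity(amazon_title: str, target_title: str) -> bool:
--     """Check if Amazon and Target products are of similar types"""
--     # Extract potential product type keywords
--     type_keywords = {
--         'chair', 'table', 'desk', 'bed', 'sofa', 'couch', 'dresser',
--         'phone', 'laptop', 'computer', 'tablet', 'headphone', 'speaker',
--         'kitchen', 'appliance', 'dishwasher', 'microwave', 'refrigerator',
--         'clothing', 'shirt', 'pants', 'shoes', 'boots', 'jacket',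
--         'book', 'game', 'toy', 'tool', 'camera', 'watch'
--     }
--
--     amazon_types = set()
--     target_types = set()
--
--     for keyword in type_keywords:
--         if keyword in amazon_title.lower():
--             amazon_types.add(keyword)
--         if keyword in target_title.lower():
--             target_types.add(keyword)
--
--     # Check for overlap in product types
--     return len(amazon_types.intersection(target_types)) > 0
-- ===== SOURCE B (Python) =====
-- def _check_product_type_similarity(amazon_title: str, target_title: str) -> bool:
--     """Check if Amazon and Target products are of similar types"""
--     type_keywords = {
--         'chair', 'table', 'desk', 'bed', 'sofa', 'couch', 'dresser',
--         'phone', 'laptop', 'computer', 'tablet', 'headphone', 'speaker',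
--         'kitchen', 'appliance', 'dishwasher', 'microwave', 'refrigerator',
--         'clothing', 'shirt', 'pants', 'shoes', 'boots', 'jacket',
--         'book', 'game', 'toy', 'tool', 'camera', 'watch'
--     }
--     # Index each title once: the set of all its substrings whose length is a
--     # keyword length; a keyword occurs in a title iff it is in that index.
--     lengths = {len(k) for k in type_keywords}
--
--     def substrings(title):
--         s = title.lower()
--         return {s[i:i + n] for n in lengths for i in range(len(s) - n + 1)}
--
--     return len(type_keywords & substrings(amazon_title) & substrings(target_title)) > 0
-- ===== Notes on version B (the rewrite author's own statement) =====
-- stated objective: alternative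
-- what changed: B inverts the search: instead of scanning the keyword set and substring-testing each keyword against both titles, it builds a substring index of each lowered title once (all substrings whose length is a keyword length) and answers by a pure set intersection of the keyword set with the two indexes, with no per-keyword substring search at all.
import Mathlib
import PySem

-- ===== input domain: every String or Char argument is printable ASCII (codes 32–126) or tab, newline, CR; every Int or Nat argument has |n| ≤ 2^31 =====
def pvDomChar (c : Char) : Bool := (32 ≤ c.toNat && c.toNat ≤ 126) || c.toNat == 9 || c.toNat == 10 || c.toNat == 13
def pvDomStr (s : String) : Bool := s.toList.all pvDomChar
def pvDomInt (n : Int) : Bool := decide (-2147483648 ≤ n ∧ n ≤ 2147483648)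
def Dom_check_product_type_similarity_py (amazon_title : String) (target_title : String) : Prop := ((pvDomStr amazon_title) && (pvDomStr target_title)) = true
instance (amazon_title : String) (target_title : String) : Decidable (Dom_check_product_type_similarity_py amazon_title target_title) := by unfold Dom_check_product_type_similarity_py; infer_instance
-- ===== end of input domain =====

-- B replaces A's per-keyword substring scans by a substring index of each lowered title
-- (all substrings whose length is a keyword length) and a pure set intersection (objective: alternative).


-- ===== PORT A =====
-- the type_keywords set literal (the fold's result is order-independent; literal order kept)
def pvTypeKeywords : List String := ["chair","table","desk","bed","sofa","couch","dresser","phone","laptop","computer","tablet","headphone","speaker","kitchen","appliance","dishwasher","microwave","refrigerator","clothing","shirt","pants","shoes","boots","jacket","book","game","toy","tool","camera","watch"]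

-- literal port of A: one loop over the keywords building the two sets, then the intersection
def check_product_type_similarity_py (amazon_title : String) (target_title : String) : Bool :=
  let st := pvTypeKeywords.foldl
    (fun (p : PySem.Set String × PySem.Set String) kw =>
      let p1 := if PySem.Str.isIn kw (PySem.Str.lower amazon_title) then (PySem.Set.add p.1 kw, p.2) else p
      if PySem.Str.isIn kw (PySem.Str.lower target_title) then (p1.1, PySem.Set.add p1.2 kw) else p1)
    (PySem.Set.empty, PySem.Set.empty)
  decide (0 < PySem.Set.len (PySem.Set.inter st.1 st.2))

-- ===== PORT B =====
-- the same keywords as lists of code points (B's sets hold character lists)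
def pvKwChars : PySem.Set (List Char) := PySem.Set.ofList (pvTypeKeywords.map String.toList)

-- lengths = {len(k) for k in type_keywords}
def pvLengths : PySem.Set Int := PySem.Set.ofList (pvTypeKeywords.map (fun k => (PySem.Str.len k : Int)))

-- the comprehension inside substrings(title): all slices s[i:i+n] for n in lengths
def pvGramsList (s : List Char) : List (List Char) :=
  pvLengths.flatMap (fun n =>
    (PySem.List.pyRange 0 ((s.length : Int) - n + 1) 1).map (fun i =>
      PySem.List.slice s (some i) (some (i + n))))

-- substrings(title): the substring index of the lowered title, as a set
def pvSubstrings (title : String) : PySem.Set (List Char) :=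
  PySem.Set.ofList (pvGramsList (PySem.Str.lower title).toList)

-- port of B: len(type_keywords & substrings(amazon) & substrings(target)) > 0
def check_product_type_similarity_py_alt (amazon_title : String) (target_title : String) : Bool :=
  decide (0 < PySem.Set.len (PySem.Set.inter pvKwChars
    (PySem.Set.inter (pvSubstrings amazon_title) (pvSubstrings target_title))))

-- ===== PRECONDITION & SPEC =====
def Spec_check_product_type_similarity_py (amazon_title : String) (target_title : String) (out : Bool) : Prop := out = check_product_type_similarity_py_alt amazon_title target_title
instance (amazon_title : String) (target_title : String) (out : Bool) : Decidable (Spec_check_product_type_similarity_py amazon_title target_title out) := by unfold Spec_check_product_type_similarity_py; infer_instance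

-- ===== CLAIM (what is proved, stated in full; the proofs are below) =====
def Claim_equal_check_product_type_similarity_py : Prop := ∀ (amazon_title : String) (target_title : String), Dom_check_product_type_similarity_py amazon_title target_title → Spec_check_product_type_similarity_py amazon_title target_title (check_product_type_similarity_py amazon_title target_title)

-- ===== LEMMAS AND PROOFS =====

-- A's paired fold splits into two independent folds
theorem pvFold_prod (pA pB : String -> Bool) (kws : List String) (sA sB : PySem.Set String) :
    kws.foldl
      (fun (p : PySem.Set String × PySem.Set String) kw =>
        let p1 := if pA kw then (PySem.Set.add p.1 kw, p.2) else p
        if pB kw then (p1.1, PySem.Set.add p1.2 kw) else p1)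
      (sA, sB)
    = (kws.foldl (fun s kw => if pA kw then PySem.Set.add s kw else s) sA,
       kws.foldl (fun s kw => if pB kw then PySem.Set.add s kw else s) sB) := by
  induction kws generalizing sA sB with
  | nil => rfl
  | cons k ks ih => simp only [List.foldl_cons]; split_ifs <;> exact ih _ _

-- guarded add-fold = ofList of the filtered list
theorem pvFold_filter (p : String -> Bool) (kws : List String) (s : PySem.Set String) :
    kws.foldl (fun s kw => if p kw then PySem.Set.add s kw else s) s
    = (kws.filter p).foldl PySem.Set.add s := by
  induction kws generalizing s with
  | nil => rfl
  | cons k ks ih =>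
    simp only [List.foldl_cons, List.filter_cons]
    split_ifs with h <;> simp [ih]

-- membership in the substring index = being an infix, for words of an indexed length
theorem pv_mem_grams (s kw : List Char) (h : ((kw.length : Int)) ∈ pvLengths) :
    kw ∈ pvGramsList s ↔ kw <:+: s := by
  unfold pvGramsList
  simp only [List.mem_flatMap, List.mem_map]
  constructor
  · rintro ⟨n, hn, i, hi, rfl⟩
    have hn0 : 0 ≤ n := by
      have : pvLengths.all (fun n => decide (0 ≤ n)) = true := by decide
      simpa using List.all_eq_true.mp this n hn
    rw [PySem.List.mem_pyRange_one] at hi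
    obtain ⟨j, rfl⟩ := Int.eq_ofNat_of_zero_le hi.1
    obtain ⟨m, rfl⟩ := Int.eq_ofNat_of_zero_le hn0
    rw [PySem.List.slice_natCast_add]
    exact ((s.drop j).take_prefix m).isInfix.trans (s.drop_suffix j).isInfix
  · rintro ⟨u, v, rfl⟩
    refine ⟨(kw.length : Int), h, (u.length : Int), ?_, ?_⟩
    · rw [PySem.List.mem_pyRange_one]
      refine ⟨Int.natCast_nonneg _, ?_⟩
      simp only [List.length_append]
      push_cast
      omega
    · rw [PySem.List.slice_natCast_add]
      simp [List.append_assoc]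

-- each keyword's length is indexed
theorem pv_kw_length_mem (kw : String) (hkw : kw ∈ pvTypeKeywords) :
    ((kw.toList.length : Int)) ∈ pvLengths := by
  fin_cases hkw <;> decide

theorem check_product_type_similarity_py_spec_aux (a t : String) :
    check_product_type_similarity_py a t = check_product_type_similarity_py_alt a t := by
  unfold check_product_type_similarity_py check_product_type_similarity_py_alt
  rw [pvFold_prod, pvFold_filter, pvFold_filter]
  rw [show (PySem.Set.empty : PySem.Set String) = ([] : List String) from rfl]
  rw [← PySem.Set.ofList_eq_foldl, ← PySem.Set.ofList_eq_foldl]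
  rw [Bool.eq_iff_iff]
  simp only [decide_eq_true_eq, PySem.Set.len, Int.natCast_pos,
    List.length_pos_iff_exists_mem, PySem.Set.mem_inter, PySem.Set.mem_ofList,
    List.mem_filter, pvKwChars, pvSubstrings, List.mem_map]
  constructor
  · rintro ⟨x, ⟨hm, h1⟩, ⟨-, h2⟩⟩
    refine ⟨x.toList, ⟨x, hm, rfl⟩, ?_, ?_⟩
    · exact (pv_mem_grams _ _ (pv_kw_length_mem x hm)).mpr
        ((PySem.Str.isIn_iff_infix _ _).mp h1)
    · exact (pv_mem_grams _ _ (pv_kw_length_mem x hm)).mpr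
        ((PySem.Str.isIn_iff_infix _ _).mp h2)
  · rintro ⟨y, ⟨x, hm, rfl⟩, hga, hgt⟩
    refine ⟨x, ⟨hm, ?_⟩, hm, ?_⟩
    · exact (PySem.Str.isIn_iff_infix _ _).mpr
        ((pv_mem_grams _ _ (pv_kw_length_mem x hm)).mp hga)
    · exact (PySem.Str.isIn_iff_infix _ _).mpr
        ((pv_mem_grams _ _ (pv_kw_length_mem x hm)).mp hgt)

-- ===== VERDICT (by name: the statement is the Claim_ definition above) =====
theorem check_product_type_similarity_py_spec : Claim_equal_check_product_type_similarity_py := by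
  intro a t _
  unfold Spec_check_product_type_similarity_py
  exact check_product_type_similarity_py_spec_aux a t
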